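-- pv_equiv track=rewrite | github.com/sticky-ai/Algorithms | codesignal/arcade/the_core/bishopDiagonal.py | bishopDiagonal
-- ===== SOURCE A (Python) =====
-- def bishopDiagonal(b1, b2):
--     b1, b2 = [ord(i) for i in b1], [ord(i) for i in b2]
--     if abs(b1[0]-b2[0])==abs(b1[1]-b2[1]):
--         if b1[0]<b2[0]:
--             if b1[1]<b2[1]:
--                 while b1[0]>97 and b1[1]>49: b1[0], b1[1] = b1[0]-1, b1[1]-1
--                 while b2[0]<104 and b2[1]<56: b2[0], b2[1] = b2[0]+1, b2[1]+1
--             else: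
--                 while b1[0]>97 and b1[1]<56: b1[0], b1[1] = b1[0]-1, b1[1]+1
--                 while b2[0]<104 and b2[1]>49: b2[0], b2[1] = b2[0]+1, b2[1]-1
--         else:
--             if b1[1]<b2[1]:
--                 while b1[0]<104 and b1[1]>49: b1[0], b1[1] = b1[0]+1, b1[1]-1
--                 while b2[0]>97 and b2[1]<56: b2[0], b2[1] = b2[0]-1, b2[1]+1
--             else:
--                 while b1[0]<104 and b1[1]<56: b1[0], b1[1] = b1[0]+1, b1[1]+1
--                 while b2[0]>97 and b2[1]>49: b2[0], b2[1] = b2[0]-1, b2[1]-1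
--     return sorted(["".join([chr(b1[0]),chr(b1[1])]),"".join([chr(b2[0]),chr(b2[1])])])
-- ===== SOURCE B (Python) =====
-- def bishopDiagonal(b1, b2):
--     x1, y1 = ord(b1[0]), ord(b1[1])
--     x2, y2 = ord(b2[0]), ord(b2[1])
--     if abs(x1 - x2) == abs(y1 - y2):
--         sx = 1 if x1 < x2 else -1
--         sy = 1 if y1 < y2 else -1
--         # b1 is pushed opposite to (sx, sy), b2 along (sx, sy), each by the
--         # exact number of free squares to the nearer edge (a-h = 97-104, 1-8 = 49-56).
--         k1 = max(0, min(x1 - 97 if sx == 1 else 104 - x1,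
--                         y1 - 49 if sy == 1 else 56 - y1))
--         k2 = max(0, min(104 - x2 if sx == 1 else x2 - 97,
--                         56 - y2 if sy == 1 else y2 - 49))
--         x1, y1 = x1 - sx * k1, y1 - sy * k1
--         x2, y2 = x2 + sx * k2, y2 + sy * k2
--     return sorted([chr(x1) + chr(y1), chr(x2) + chr(y2)])
-- ===== Notes on version B (the rewrite author's own statement) =====
-- stated objective: simpler
-- what changed: Replaces A's four one-square-at-a-time while loops with a single closed-form step count per endpoint (min of the distances to the two relevant board edges), applied in one arithmetic move.
import Mathlib
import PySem

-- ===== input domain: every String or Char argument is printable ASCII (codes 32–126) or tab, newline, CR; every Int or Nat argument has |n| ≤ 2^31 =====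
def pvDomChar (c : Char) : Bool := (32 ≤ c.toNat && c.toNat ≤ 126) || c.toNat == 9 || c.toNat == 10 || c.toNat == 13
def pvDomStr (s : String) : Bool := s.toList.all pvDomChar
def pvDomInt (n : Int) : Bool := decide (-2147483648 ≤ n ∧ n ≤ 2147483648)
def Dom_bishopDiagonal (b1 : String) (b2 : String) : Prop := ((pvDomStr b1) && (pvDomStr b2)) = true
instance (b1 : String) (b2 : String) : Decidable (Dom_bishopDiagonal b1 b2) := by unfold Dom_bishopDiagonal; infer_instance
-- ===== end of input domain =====

-- B replaces A's four one-square-at-a-time while loops by a closed-form step count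
-- (min of the distances to the two relevant board edges) applied once per endpoint; objective: simpler.

-- ===== PORT A =====
-- the four while loops of A, one helper each (step one square at a time)
def pvLoopDL (x y : Int) : Int × Int :=
  if 97 < x ∧ 49 < y then pvLoopDL (x - 1) (y - 1) else (x, y)
termination_by (x - 97).toNat
decreasing_by omega

def pvLoopUR (x y : Int) : Int × Int :=
  if x < 104 ∧ y < 56 then pvLoopUR (x + 1) (y + 1) else (x, y)
termination_by (104 - x).toNat
decreasing_by omega

def pvLoopUL (x y : Int) : Int × Int :=
  if 97 < x ∧ y < 56 then pvLoopUL (x - 1) (y + 1) else (x, y)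
termination_by (x - 97).toNat
decreasing_by omega

def pvLoopDR (x y : Int) : Int × Int :=
  if x < 104 ∧ 49 < y then pvLoopDR (x + 1) (y - 1) else (x, y)
termination_by (104 - x).toNat
decreasing_by omega

def bishopDiagonal (b1 : String) (b2 : String) : List String :=
  let l1 : List Int := b1.toList.map (fun c => (c.toNat : Int))
  let l2 : List Int := b2.toList.map (fun c => (c.toNat : Int))
  match PySem.List.pyGet? l1 0, PySem.List.pyGet? l1 1,
        PySem.List.pyGet? l2 0, PySem.List.pyGet? l2 1 with
  | some x1, some y1, some x2, some y2 =>
    let (p1, p2) :=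
      if (x1 - x2).natAbs = (y1 - y2).natAbs then
        if x1 < x2 then
          if y1 < y2 then (pvLoopDL x1 y1, pvLoopUR x2 y2)
          else (pvLoopUL x1 y1, pvLoopDR x2 y2)
        else
          if y1 < y2 then (pvLoopDR x1 y1, pvLoopUL x2 y2)
          else (pvLoopUR x1 y1, pvLoopDL x2 y2)
      else ((x1, y1), (x2, y2))
    PySem.List.sorted
      [String.mk [Char.ofNat p1.1.toNat, Char.ofNat p1.2.toNat],
       String.mk [Char.ofNat p2.1.toNat, Char.ofNat p2.2.toNat]] (fun s => s) false
  | _, _, _, _ => []  -- unreachable under Pre_ (Python raises IndexError)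

-- ===== PORT B =====
def bishopDiagonal_alt (b1 : String) (b2 : String) : List String :=
  (((PySem.Str.pyGet? b1 0).bind fun c1 =>
    (PySem.Str.pyGet? b1 1).bind fun d1 =>
    (PySem.Str.pyGet? b2 0).bind fun c2 =>
    (PySem.Str.pyGet? b2 1).map fun d2 =>
    let x1 : Int := c1.toNat
    let y1 : Int := d1.toNat
    let x2 : Int := c2.toNat
    let y2 : Int := d2.toNat
    if (x1 - x2).natAbs = (y1 - y2).natAbs then
      let sx : Int := if x1 < x2 then 1 else -1
      let sy : Int := if y1 < y2 then 1 else -1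
      let k1 : Int := max 0 (min (if sx = 1 then x1 - 97 else 104 - x1)
                                 (if sy = 1 then y1 - 49 else 56 - y1))
      let k2 : Int := max 0 (min (if sx = 1 then 104 - x2 else x2 - 97)
                                 (if sy = 1 then 56 - y2 else y2 - 49))
      PySem.List.sorted
        [String.mk [Char.ofNat (x1 - sx * k1).toNat, Char.ofNat (y1 - sy * k1).toNat],
         String.mk [Char.ofNat (x2 + sx * k2).toNat, Char.ofNat (y2 + sy * k2).toNat]]
        (fun s => s) false
    else
      PySem.List.sorted
        [String.mk [Char.ofNat x1.toNat, Char.ofNat y1.toNat],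
         String.mk [Char.ofNat x2.toNat, Char.ofNat y2.toNat]] (fun s => s) false
  ).getD [])  -- the Option is none exactly where Python raises IndexError (outside Pre_)

-- ===== PRECONDITION & SPEC =====
-- Pre_ excludes strings shorter than 2 characters, on which A raises IndexError.
def Pre_bishopDiagonal (b1 : String) (b2 : String) : Prop :=
  2 ≤ b1.toList.length ∧ 2 ≤ b2.toList.length
instance (b1 : String) (b2 : String) : Decidable (Pre_bishopDiagonal b1 b2) := by
  unfold Pre_bishopDiagonal; infer_instance
def pvWitness_bishopDiagonal : String × String := ("c3", "f6")

def Spec_bishopDiagonal (b1 : String) (b2 : String) (out : List String) : Prop := out = bishopDiagonal_alt b1 b2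
instance (b1 : String) (b2 : String) (out : List String) : Decidable (Spec_bishopDiagonal b1 b2 out) := by unfold Spec_bishopDiagonal; infer_instance

-- ===== CLAIM (what is proved, stated in full; the proofs are below) =====
def Claim_equal_bishopDiagonal : Prop := ∀ (b1 : String) (b2 : String), Dom_bishopDiagonal b1 b2 → Pre_bishopDiagonal b1 b2 → Spec_bishopDiagonal b1 b2 (bishopDiagonal b1 b2)

-- ===== LEMMAS AND PROOFS =====

theorem pvLoopDL_eq (x y : Int) :
    pvLoopDL x y = (x - max 0 (min (x - 97) (y - 49)), y - max 0 (min (x - 97) (y - 49))) := by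
  fun_induction pvLoopDL x y with
  | case1 x y h ih =>
    rw [ih]
    simp only [Prod.mk.injEq]; constructor <;> omega
  | case2 x y h =>
    simp only [Prod.mk.injEq]; constructor <;> omega

theorem pvLoopUR_eq (x y : Int) :
    pvLoopUR x y = (x + max 0 (min (104 - x) (56 - y)), y + max 0 (min (104 - x) (56 - y))) := by
  fun_induction pvLoopUR x y with
  | case1 x y h ih =>
    rw [ih]
    simp only [Prod.mk.injEq]; constructor <;> omega
  | case2 x y h =>
    simp only [Prod.mk.injEq]; constructor <;> omega

theorem pvLoopUL_eq (x y : Int) :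
    pvLoopUL x y = (x - max 0 (min (x - 97) (56 - y)), y + max 0 (min (x - 97) (56 - y))) := by
  fun_induction pvLoopUL x y with
  | case1 x y h ih =>
    rw [ih]
    simp only [Prod.mk.injEq]; constructor <;> omega
  | case2 x y h =>
    simp only [Prod.mk.injEq]; constructor <;> omega

theorem pvLoopDR_eq (x y : Int) :
    pvLoopDR x y = (x + max 0 (min (104 - x) (y - 49)), y - max 0 (min (104 - x) (y - 49))) := by
  fun_induction pvLoopDR x y with
  | case1 x y h ih =>
    rw [ih]
    simp only [Prod.mk.injEq]; constructor <;> omega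
  | case2 x y h =>
    simp only [Prod.mk.injEq]; constructor <;> omega

theorem pvOutCongr (a b c d a' b' c' d' : Int)
    (h1 : a = a') (h2 : b = b') (h3 : c = c') (h4 : d = d') :
    PySem.List.sorted
      [String.mk [Char.ofNat a.toNat, Char.ofNat b.toNat],
       String.mk [Char.ofNat c.toNat, Char.ofNat d.toNat]] (fun s => s) false =
    PySem.List.sorted
      [String.mk [Char.ofNat a'.toNat, Char.ofNat b'.toNat],
       String.mk [Char.ofNat c'.toNat, Char.ofNat d'.toNat]] (fun s => s) false := by
  subst h1 h2 h3 h4; rfl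

-- ===== VERDICT (by name: the statement is the Claim_ definition above) =====
theorem bishopDiagonal_spec : Claim_equal_bishopDiagonal := by
  intro b1 b2 _hdom hpre
  obtain ⟨h1, h2⟩ := hpre
  unfold Spec_bishopDiagonal bishopDiagonal bishopDiagonal_alt
  rcases hb1 : b1.toList with _ | ⟨c1, _ | ⟨d1, t1⟩⟩ <;> rw [hb1] at h1 <;> simp at h1
  rcases hb2 : b2.toList with _ | ⟨c2, _ | ⟨d2, t2⟩⟩ <;> rw [hb2] at h2 <;> simp at h2
  have a1 : PySem.List.pyGet? ((c1 :: d1 :: t1).map (fun c => (c.toNat : Int))) 0 = some (c1.toNat : Int) := by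
    simp [pysem]
  have a2 : PySem.List.pyGet? ((c1 :: d1 :: t1).map (fun c => (c.toNat : Int))) 1 = some (d1.toNat : Int) := by
    simp [pysem]
  have a3 : PySem.List.pyGet? ((c2 :: d2 :: t2).map (fun c => (c.toNat : Int))) 0 = some (c2.toNat : Int) := by
    simp [pysem]
  have a4 : PySem.List.pyGet? ((c2 :: d2 :: t2).map (fun c => (c.toNat : Int))) 1 = some (d2.toNat : Int) := by
    simp [pysem]
  have s1 : PySem.Str.pyGet? b1 0 = some c1 := by simp [pysem, PySem.Str.pyGet?, hb1]
  have s2 : PySem.Str.pyGet? b1 1 = some d1 := by simp [pysem, PySem.Str.pyGet?, hb1]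
  have s3 : PySem.Str.pyGet? b2 0 = some c2 := by simp [pysem, PySem.Str.pyGet?, hb2]
  have s4 : PySem.Str.pyGet? b2 1 = some d2 := by simp [pysem, PySem.Str.pyGet?, hb2]
  simp only [a1, a2, a3, a4, s1, s2, s3, s4, Option.bind_some, Option.map_some, Option.getD_some]
  set x1 : Int := (c1.toNat : Int) with hx1
  set y1 : Int := (d1.toNat : Int) with hy1
  set x2 : Int := (c2.toNat : Int) with hx2
  set y2 : Int := (d2.toNat : Int) with hy2
  by_cases hd : (x1 - x2).natAbs = (y1 - y2).natAbs
  · rw [if_pos hd, if_pos hd]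
    by_cases hx : x1 < x2 <;> by_cases hy : y1 < y2
    · simp only [if_pos hx, if_pos hy, if_pos (show (1:Int) = 1 from rfl), if_neg (show ¬((-1:Int) = 1) by decide), one_mul, neg_mul, if_true, if_pos trivial, pvLoopDL_eq, pvLoopUR_eq]
      all_goals exact pvOutCongr _ _ _ _ _ _ _ _ (by omega) (by omega) (by omega) (by omega)
    · simp only [if_pos hx, if_neg hy, if_pos (show (1:Int) = 1 from rfl), if_neg (show ¬((-1:Int) = 1) by decide), one_mul, neg_mul, if_true, if_pos trivial, pvLoopUL_eq, pvLoopDR_eq]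
      all_goals exact pvOutCongr _ _ _ _ _ _ _ _ (by omega) (by omega) (by omega) (by omega)
    · simp only [if_neg hx, if_pos hy, if_pos (show (1:Int) = 1 from rfl), if_neg (show ¬((-1:Int) = 1) by decide), one_mul, neg_mul, if_true, if_pos trivial, pvLoopDR_eq, pvLoopUL_eq]
      all_goals exact pvOutCongr _ _ _ _ _ _ _ _ (by omega) (by omega) (by omega) (by omega)
    · simp only [if_neg hx, if_neg hy, if_pos (show (1:Int) = 1 from rfl), if_neg (show ¬((-1:Int) = 1) by decide), one_mul, neg_mul, if_true, if_pos trivial, pvLoopUR_eq, pvLoopDL_eq]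
      all_goals exact pvOutCongr _ _ _ _ _ _ _ _ (by omega) (by omega) (by omega) (by omega)
  · rw [if_neg hd, if_neg hd]
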